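-- pv_equiv track=rewrite | github.com/chipmuenk/pyfda | pyfda/libs/pyfda_fix_lib.py | bin2hex
-- ===== SOURCE A (Python) =====
-- def bin2hex(bin_str: str, WI=0) -> str:
--     """
--     Convert number `bin_str` in binary format to hex formatted string.
--     `bin_str` is prepended / appended with zeros until the number of bits before
--     and after the radix point (position given by `WI`) is a multiple of 4.
--     """
--
--     wmap = {
--         '0000': '0',
--         '0001': '1',
--         '0010': '2',
--         '0011': '3',
--         '0100': '4',
--         '0101': '5',
--         '0110': '6',
--         '0111': '7',
--         '1000': '8',
--         '1001': '9',
--         '1010': 'A',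
--         '1011': 'B',
--         '1100': 'C',
--         '1101': 'D',
--         '1110': 'E',
--         '1111': 'F'
--         }
--
--     hex_str = ""
--
--     if WI > 0:
--         # slice string with integer bits and prepend with zeros to obtain a
--         # multiple of 4 length:
--         bin_i_str = bin_str[:WI+1]
--         while (len(bin_i_str) % 4 != 0):
--             bin_i_str = "0" + bin_i_str
--
--         i = 0
--         while (i < len(bin_i_str)):  # map chunks of 4 binary bits to one hex digit
--             hex_str = hex_str + wmap[bin_i_str[i:i + 4]]
--             i = i + 4
--     else:
--         hex_str = bin_str[0]  # copy MSB as sign bit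
--
--     WF = len(bin_str) - WI - 1
--     # slice string with fractional bits and append with zeros to obtain a
--     # multiple of 4 length:
--     if WF > 0:
--         hex_str = hex_str + '.'
--         bin_f_str = bin_str[WI+1:]
--
--         while (len(bin_f_str) % 4 != 0):
--             bin_f_str = bin_f_str + "0"
--
--         i = 0
--         while (i < len(bin_f_str)):  # map chunks of 4 binary bits to one hex digit
--             hex_str = hex_str + wmap[bin_f_str[i:i + 4]]
--             i = i + 4
--
--     # hex_str = hex_str.lstrip("0") # remove leading zeros
--     hex_str = "0" if len(hex_str) == 0 else hex_str
--     return hex_str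
-- ===== SOURCE B (Python) =====
-- def _bits_to_int(s):
--     # value of a binary digit string (empty -> 0); rejects non-binary digits
--     v = 0
--     for c in s:
--         if c != '0' and c != '1':
--             raise ValueError("invalid binary digit: " + repr(c))
--         v = 2 * v + (1 if c == '1' else 0)
--     return v
--
--
-- def _hex_digits(v):
--     # uppercase hex digits of v >= 0, like format(v, 'X')
--     digs = "0123456789ABCDEF"
--     out = ""
--     while v > 0:
--         out = digs[v % 16] + out
--         v //= 16
--     return out if out else "0"
--
--
-- def bin2hex(bin_str: str, WI=0) -> str:
--     if WI > 0:
--         part = bin_str[:WI + 1]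
--         if part:
--             ndig = -(-len(part) // 4)
--             hex_str = _hex_digits(_bits_to_int(part)).zfill(ndig)
--         else:
--             hex_str = ""
--     else:
--         hex_str = bin_str[0]  # copy MSB as sign bit
--     if len(bin_str) - WI - 1 > 0:
--         frac = bin_str[WI + 1:]
--         ndig = -(-len(frac) // 4)
--         pad = -len(frac) % 4
--         hex_str = hex_str + '.' + _hex_digits(_bits_to_int(frac) * 2 ** pad).zfill(ndig)
--     return hex_str if hex_str else "0"
-- ===== Notes on version B (the rewrite author's own statement) =====
-- stated objective: alternative
-- what changed: Replaces A's pad-to-a-multiple-of-4 loops and the 16-entry dict lookup over 4-bit chunks by numeric conversion: each bit-field is folded into an integer and printed as fixed-width uppercase hex via div/mod-16 digits plus zfill.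
import Mathlib
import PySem

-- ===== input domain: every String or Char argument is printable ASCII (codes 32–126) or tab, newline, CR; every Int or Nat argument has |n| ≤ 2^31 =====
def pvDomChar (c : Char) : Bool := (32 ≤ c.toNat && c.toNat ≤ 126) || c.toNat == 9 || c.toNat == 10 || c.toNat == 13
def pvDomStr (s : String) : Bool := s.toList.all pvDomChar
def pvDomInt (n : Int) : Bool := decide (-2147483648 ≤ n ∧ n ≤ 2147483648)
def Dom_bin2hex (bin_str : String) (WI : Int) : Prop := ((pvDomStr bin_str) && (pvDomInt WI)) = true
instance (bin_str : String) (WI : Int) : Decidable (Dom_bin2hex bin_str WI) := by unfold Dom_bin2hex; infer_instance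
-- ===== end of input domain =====

set_option maxRecDepth 4000


-- B replaces A's pad-to-multiple-of-4 + 16-entry-dict chunk loop by numeric conversion:
-- each bit-field is folded to an integer and printed as fixed-width uppercase hex (div/mod 16 + zfill).

-- ===== PORT A =====

def wmapA : PySem.Dict String String := PySem.Dict.ofList
  [("0000", "0"), ("0001", "1"), ("0010", "2"), ("0011", "3"),
   ("0100", "4"), ("0101", "5"), ("0110", "6"), ("0111", "7"),
   ("1000", "8"), ("1001", "9"), ("1010", "A"), ("1011", "B"),
   ("1100", "C"), ("1101", "D"), ("1110", "E"), ("1111", "F")]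

theorem pvPadLt : ∀ l : Nat, l % 4 ≠ 0 → (4 - (l + 1) % 4) % 4 < (4 - l % 4) % 4 := by
  intro l h
  rw [Nat.add_mod]
  have hm : l % 4 < 4 := Nat.mod_lt _ (by decide)
  revert h hm
  generalize l % 4 = m
  intro h hm
  match m, h, hm with
  | 1, _, _ => decide
  | 2, _, _ => decide
  | 3, _, _ => decide
  | 0, h, _ => exact absurd rfl h
  | (n + 4), _, hm => exact absurd (Nat.le_add_left 4 n) (Nat.not_le_of_gt hm)

theorem pvFdivLt (v : Int) (h : v > 0) : (PySem.Int.floordiv v 16).toNat < v.toNat := by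
  show (v.fdiv 16).toNat < v.toNat
  rw [Int.fdiv_eq_ediv, if_pos (Or.inl (by decide)), Int.sub_zero]
  have h16 : (0:Int) < 16 := by decide
  have hlt : v < v * 16 := lt_mul_of_one_lt_right h (by decide)
  exact (Int.toNat_lt_toNat h).mpr ((Int.ediv_lt_iff_lt_mul h16).mpr hlt)

-- while (len(bin_i_str) % 4 != 0): bin_i_str = "0" + bin_i_str
def padLeftA (cs : List Char) : List Char :=
  if cs.length % 4 ≠ 0 then padLeftA ('0' :: cs) else cs
termination_by (4 - cs.length % 4) % 4
decreasing_by rename_i h; exact (List.length_cons (a := '0') (as := cs)) ▸ pvPadLt cs.length h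

-- while (len(bin_f_str) % 4 != 0): bin_f_str = bin_f_str + "0"
def padRightA (cs : List Char) : List Char :=
  if cs.length % 4 ≠ 0 then padRightA (cs ++ ['0']) else cs
termination_by (4 - cs.length % 4) % 4
decreasing_by
  rename_i h
  have e : (cs ++ ['0']).length = cs.length + 1 := by rw [List.length_append, List.length_cons, List.length_nil]
  exact e ▸ pvPadLt cs.length h

-- i = 0; while i < len: hex_str += wmap[s[i:i+4]]; i += 4   (the i-th slice is take 4 of drop i;
-- wmap[...] raises KeyError on a chunk that is not 4 binary digits — those inputs are outside Pre_,
-- the default "" is never reached there)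
def chunkA (cs : List Char) (hex : List Char) : List Char :=
  if cs = [] then hex
  else chunkA (cs.drop 4) (hex ++ (wmapA.getD (String.ofList (cs.take 4)) "").toList)
termination_by cs.length
decreasing_by
  rename_i h
  exact (List.length_drop (l := cs) (i := 4)) ▸ Nat.sub_lt (List.length_pos_iff.mpr h) (by decide)

def bin2hex (bin_str : String) (WI : Int) : String :=
  let cs := bin_str.toList
  let hex1 : List Char :=
    if WI > 0 then
      chunkA (padLeftA (PySem.List.slice cs none (some (WI + 1)))) []
    else
      -- hex_str = bin_str[0]  (IndexError on the empty string — outside Pre_)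
      match PySem.List.pyGet? cs 0 with
      | some c => [c]
      | none => []
  let WF : Int := (cs.length : Int) - WI - 1
  let hex2 : List Char :=
    if WF > 0 then
      hex1 ++ '.' :: chunkA (padRightA (PySem.List.slice cs (some (WI + 1)) none)) []
    else hex1
  String.ofList (if hex2.length = 0 then ['0'] else hex2)

-- ===== PORT B =====

-- v = 0; for c in s: raise ValueError unless c in '01'; v = 2*v + (1 if c == '1' else 0)
-- (the ValueError on a non-binary digit is outside Pre_, where the branch below is exact)
def bitsToIntB (cs : List Char) : Int :=
  cs.foldl (fun v c => 2 * v + (if c = '1' then 1 else 0)) 0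

-- out = ""; while v > 0: out = digs[v % 16] + out; v //= 16
def hexGoB (v : Int) (out : List Char) : List Char :=
  if v > 0 then
    hexGoB (PySem.Int.floordiv v 16)
      (PySem.List.pyGetD "0123456789ABCDEF".toList (PySem.Int.mod v 16) '?' :: out)
  else out
termination_by v.toNat
decreasing_by rename_i h; exact pvFdivLt v h

-- _hex_digits(v): the loop, then 'out if out else "0"'
def hexDigitsB (v : Int) : List Char :=
  let out := hexGoB v []
  if out = [] then ['0'] else out

def bin2hex_alt (bin_str : String) (WI : Int) : String :=
  let cs := bin_str.toList
  let hex1 : List Char :=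
    if WI > 0 then
      let part := PySem.List.slice cs none (some (WI + 1))
      if part = [] then []
      else
        -- ndig = -(-len(part) // 4); _hex_digits(_bits_to_int(part)).zfill(ndig)
        PySem.Chars.zfill (hexDigitsB (bitsToIntB part))
          (-(PySem.Int.floordiv (-(part.length : Int)) 4))
    else
      -- hex_str = bin_str[0]  (IndexError on the empty string — outside Pre_)
      match PySem.List.pyGet? cs 0 with
      | some c => [c]
      | none => []
  let hex2 : List Char :=
    if (cs.length : Int) - WI - 1 > 0 then
      let frac := PySem.List.slice cs (some (WI + 1)) none
      let pad := PySem.Int.mod (-(frac.length : Int)) 4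
      -- 2 ** pad with pad = -len(frac) % 4 ∈ [0,4): the exponent is the nonnegative pad, exact
      hex1 ++ '.' :: PySem.Chars.zfill (hexDigitsB (bitsToIntB frac * 2 ^ pad.toNat))
        (-(PySem.Int.floordiv (-(frac.length : Int)) 4))
    else hex1
  String.ofList (if hex2 = [] then ['0'] else hex2)

-- ===== PRECONDITION & SPEC =====
-- Pre_ is exactly the set of inputs on which A returns: the sliced integer bit-field (when WI > 0)
-- and the sliced fractional bit-field (when WF > 0) contain only '0'/'1' (else A's dict lookup
-- raises KeyError), and bin_str is nonempty when WI ≤ 0 (else bin_str[0] raises IndexError).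
def Pre_bin2hex (bin_str : String) (WI : Int) : Prop :=
  (WI ≤ 0 → bin_str ≠ "") ∧
  (WI > 0 → (PySem.List.slice bin_str.toList none (some (WI + 1))).all
    (fun c => c == '0' || c == '1') = true) ∧
  ((bin_str.toList.length : Int) - WI - 1 > 0 →
    (PySem.List.slice bin_str.toList (some (WI + 1)) none).all
      (fun c => c == '0' || c == '1') = true)
instance (bin_str : String) (WI : Int) : Decidable (Pre_bin2hex bin_str WI) := by
  unfold Pre_bin2hex; infer_instance

def pvWitness_bin2hex : String × Int := ("10110", 1)

def Spec_bin2hex (bin_str : String) (WI : Int) (out : String) : Prop := out = bin2hex_alt bin_str WI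
instance (bin_str : String) (WI : Int) (out : String) : Decidable (Spec_bin2hex bin_str WI out) := by
  unfold Spec_bin2hex; infer_instance

-- ===== CLAIM (what is proved, stated in full; the proofs are below) =====
def Claim_equal_bin2hex : Prop := ∀ (bin_str : String) (WI : Int), Dom_bin2hex bin_str WI → Pre_bin2hex bin_str WI → Spec_bin2hex bin_str WI (bin2hex bin_str WI)

-- ===== LEMMAS AND PROOFS =====

-- spec-side value of a binary digit list (Nat twin of bitsToIntB)
def bitsValN (cs : List Char) : Nat :=
  cs.foldl (fun v c => 2 * v + (if c = '1' then 1 else 0)) 0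

def hexDigN (n : Nat) : Char := "0123456789ABCDEF".toList.getD n '?'

def hexCharsN (n : Nat) : List Char :=
  if h : n = 0 then [] else hexCharsN (n / 16) ++ [hexDigN (n % 16)]
termination_by n
decreasing_by exact Nat.div_lt_self (Nat.pos_of_ne_zero h) (by norm_num)

-- n printed as exactly max k (number of hex digits of n) hex digits
def hexFixed (k n : Nat) : List Char :=
  List.replicate (k - (hexCharsN n).length) '0' ++ hexCharsN n

theorem hexCharsN_zero : hexCharsN 0 = [] := by rw [hexCharsN]; simp

theorem bitsFold (cs : List Char) : ∀ v : Nat,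
    cs.foldl (fun v c => 2 * v + (if c = '1' then 1 else 0)) v
      = v * 2 ^ cs.length + bitsValN cs := by
  induction cs with
  | nil => intro v; simp [bitsValN]
  | cons c t ih =>
    intro v
    show List.foldl _ (2 * v + (if c = '1' then 1 else 0)) t
      = v * 2 ^ (c :: t).length + bitsValN (c :: t)
    have hb : bitsValN (c :: t)
        = List.foldl (fun v c => 2 * v + (if c = '1' then 1 else 0))
            (2 * 0 + (if c = '1' then 1 else 0)) t := rfl
    rw [ih, hb, ih, List.length_cons]
    generalize (if c = '1' then (1 : Nat) else 0) = b
    ring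

theorem bitsValN_append (xs ys : List Char) :
    bitsValN (xs ++ ys) = bitsValN xs * 2 ^ ys.length + bitsValN ys := by
  show List.foldl _ _ (xs ++ ys) = _
  rw [List.foldl_append]
  exact bitsFold ys _

theorem bitsValN_replicate0 (j : Nat) : bitsValN (List.replicate j '0') = 0 := by
  induction j with
  | zero => rfl
  | succ j ih =>
    rw [List.replicate_succ', bitsValN_append, ih]
    simp [show bitsValN ['0'] = 0 from by decide]

theorem bitsValN_lt (cs : List Char) (h : ∀ c ∈ cs, c = '0' ∨ c = '1') :
    bitsValN cs < 2 ^ cs.length := by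
  induction cs with
  | nil => decide
  | cons c t ih =>
    have hsplit : bitsValN (c :: t) = bitsValN [c] * 2 ^ t.length + bitsValN t := by
      rw [show c :: t = [c] ++ t from rfl, bitsValN_append]
    have hc : bitsValN [c] ≤ 1 := by
      rcases h c (by simp) with rfl | rfl <;> decide
    have ht := ih (fun c hc => h c (by simp [hc]))
    have hp : (0:Nat) < 2 ^ t.length := pow_pos (by norm_num) _
    rw [hsplit, List.length_cons, pow_succ]
    nlinarith

theorem padLeftA_eq (p : List Char) :
    padLeftA p = List.replicate ((4 - p.length % 4) % 4) '0' ++ p := by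
  fun_induction padLeftA p with
  | case1 p h ih =>
    rw [ih]
    have h1 : (4 - ('0' :: p).length % 4) % 4 + 1 = (4 - p.length % 4) % 4 := by
      simp only [List.length_cons]; omega
    rw [← h1, List.replicate_succ']
    simp
  | case2 p _ =>
    have : (4 - p.length % 4) % 4 = 0 := by omega
    simp [this]

theorem padRightA_eq (p : List Char) :
    padRightA p = p ++ List.replicate ((4 - p.length % 4) % 4) '0' := by
  fun_induction padRightA p with
  | case1 p h ih =>
    rw [ih]
    have h1 : (4 - (p ++ ['0']).length % 4) % 4 + 1 = (4 - p.length % 4) % 4 := by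
      simp only [List.length_append, List.length_cons, List.length_nil]; omega
    rw [← h1, List.append_assoc]
    congr 1
  | case2 p _ =>
    have : (4 - p.length % 4) % 4 = 0 := by omega
    simp [this]

theorem chunkA_nil (acc : List Char) : chunkA [] acc = acc := by
  rw [chunkA]; simp

theorem chunkA_acc_aux (n : Nat) : ∀ (cs acc : List Char), cs.length ≤ n →
    chunkA cs acc = acc ++ chunkA cs [] := by
  induction n with
  | zero =>
    intro cs acc h
    have : cs = [] := List.eq_nil_of_length_eq_zero (by omega)
    subst this
    rw [chunkA_nil, chunkA_nil]; simp
  | succ n ih =>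
    intro cs acc h
    by_cases hcs : cs = []
    · subst hcs; rw [chunkA_nil, chunkA_nil]; simp
    · have hlen : 1 ≤ cs.length := by
        cases cs with | nil => exact absurd rfl hcs | cons a t => simp
      conv_lhs => rw [chunkA]
      conv_rhs => rw [chunkA]
      rw [if_neg hcs, if_neg hcs]
      rw [ih (cs.drop 4) _ (by simp; omega)]
      simp [ih (cs.drop 4) ((wmapA.getD (String.ofList (List.take 4 cs)) "").toList)
        (by simp; omega)]

theorem chunkA_acc (cs acc : List Char) : chunkA cs acc = acc ++ chunkA cs [] :=
  chunkA_acc_aux cs.length cs acc le_rfl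

theorem dig4 (a b c d : Char)
    (ha : a = '0' ∨ a = '1') (hb : b = '0' ∨ b = '1')
    (hc : c = '0' ∨ c = '1') (hd : d = '0' ∨ d = '1') :
    (wmapA.getD (String.ofList [a, b, c, d]) "").toList
        = [hexDigN (bitsValN [a, b, c, d])] ∧ bitsValN [a, b, c, d] < 16 := by
  rcases ha with rfl | rfl <;> rcases hb with rfl | rfl <;>
    rcases hc with rfl | rfl <;> rcases hd with rfl | rfl <;> decide

theorem hexCharsN_len_le (k : Nat) : ∀ m, m < 16 ^ k → (hexCharsN m).length ≤ k := by
  induction k with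
  | zero =>
    intro m hm
    have : m = 0 := by simpa using hm
    subst this; simp [hexCharsN_zero]
  | succ k ih =>
    intro m hm
    by_cases h0 : m = 0
    · subst h0; simp [hexCharsN_zero]
    · rw [hexCharsN, dif_neg h0]
      have hdiv : m / 16 < 16 ^ k := by
        rw [Nat.div_lt_iff_lt_mul (by norm_num)]
        rw [pow_succ] at hm; omega
      have := ih (m / 16) hdiv
      simp; omega

theorem hexCharsN_ne_nil (n : Nat) (h : n ≠ 0) : hexCharsN n ≠ [] := by
  rw [hexCharsN, dif_neg h]; simp

theorem hexHX (k : Nat) : ∀ b m, 0 < b → b < 16 → m < 16 ^ k →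
    hexCharsN (b * 16 ^ k + m)
      = hexDigN b :: (List.replicate (k - (hexCharsN m).length) '0' ++ hexCharsN m) := by
  induction k with
  | zero =>
    intro b m hb hb16 hm
    have hm0 : m = 0 := by simpa using hm
    subst hm0
    simp only [pow_zero, mul_one, Nat.add_zero, hexCharsN_zero]
    rw [hexCharsN, dif_neg (by omega), Nat.div_eq_of_lt hb16, Nat.mod_eq_of_lt hb16,
      hexCharsN_zero]
    simp
  | succ k ih =>
    intro b m hb hb16 hm
    have hp : (0:Nat) < 16 ^ (k + 1) := by positivity
    have hne : b * 16 ^ (k + 1) + m ≠ 0 := by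
      have := Nat.mul_pos hb hp; omega
    have hm16 : m / 16 < 16 ^ k := by
      rw [Nat.div_lt_iff_lt_mul (by norm_num)]
      rw [pow_succ] at hm; omega
    rw [hexCharsN, dif_neg hne]
    have hdiv : (b * 16 ^ (k + 1) + m) / 16 = b * 16 ^ k + m / 16 := by
      rw [pow_succ, show b * (16 ^ k * 16) + m = 16 * (b * 16 ^ k) + m by ring,
        Nat.mul_add_div (by norm_num)]
    have hmod : (b * 16 ^ (k + 1) + m) % 16 = m % 16 := by
      rw [pow_succ, show b * (16 ^ k * 16) + m = 16 * (b * 16 ^ k) + m by ring,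
        Nat.mul_add_mod]
    rw [hdiv, hmod, ih b (m / 16) hb hb16 hm16]
    by_cases h0 : m = 0
    · subst h0
      simp only [Nat.zero_div, Nat.zero_mod, hexCharsN_zero, List.length_nil,
        Nat.sub_zero, List.append_nil]
      simp [show hexDigN 0 = '0' from by decide, List.replicate_succ']
    · conv_rhs => rw [hexCharsN, dif_neg h0]
      have hL : k + 1 - (hexCharsN (m / 16) ++ [hexDigN (m % 16)]).length
          = k - (hexCharsN (m / 16)).length := by
        simp only [List.length_append, List.length_cons, List.length_nil]; omega
      rw [hL]
      simp [List.append_assoc]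

theorem chunk_eq_hexFixed (k : Nat) : ∀ q : List Char, q.length = 4 * k →
    (∀ c ∈ q, c = '0' ∨ c = '1') → chunkA q [] = hexFixed k (bitsValN q) := by
  induction k with
  | zero =>
    intro q hq _
    have : q = [] := List.eq_nil_of_length_eq_zero (by omega)
    subst this
    rw [chunkA]
    simp [hexFixed, bitsValN, hexCharsN_zero]
  | succ k ih =>
    intro q hq hbin
    rcases q with _ | ⟨a, q⟩; · simp at hq
    rcases q with _ | ⟨b, q⟩; · simp at hq; omega
    rcases q with _ | ⟨c, q⟩; · simp at hq; omega
    rcases q with _ | ⟨d, rest⟩; · simp at hq; omega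
    have hrest : rest.length = 4 * k := by simp at hq; omega
    have hbin4 : ∀ x ∈ ([a, b, c, d] : List Char), x = '0' ∨ x = '1' := by
      intro x hx; apply hbin; simp at hx; rcases hx with rfl | rfl | rfl | rfl <;> simp
    have hbinr : ∀ x ∈ rest, x = '0' ∨ x = '1' := by
      intro x hx; apply hbin; simp [hx]
    obtain ⟨hw, hb4⟩ := dig4 a b c d (hbin4 a (by simp)) (hbin4 b (by simp))
      (hbin4 c (by simp)) (hbin4 d (by simp))
    rw [chunkA, if_neg (by simp)]
    have htake : (a :: b :: c :: d :: rest).take 4 = [a, b, c, d] := rfl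
    have hdrop : (a :: b :: c :: d :: rest).drop 4 = rest := rfl
    rw [htake, hdrop, chunkA_acc, hw, ih rest hrest hbinr]
    have hsplit : bitsValN (a :: b :: c :: d :: rest)
        = bitsValN [a, b, c, d] * 2 ^ rest.length + bitsValN rest := by
      rw [show a :: b :: c :: d :: rest = [a, b, c, d] ++ rest from rfl, bitsValN_append]
    have h216 : (2:Nat) ^ rest.length = 16 ^ k := by
      rw [hrest, pow_mul]; norm_num
    have hm : bitsValN rest < 16 ^ k := h216 ▸ bitsValN_lt rest hbinr
    have hlenm : (hexCharsN (bitsValN rest)).length ≤ k := hexCharsN_len_le k _ hm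
    rw [hsplit, h216]
    unfold hexFixed
    by_cases hb0 : bitsValN [a, b, c, d] = 0
    · rw [hb0]
      simp only [Nat.zero_mul, Nat.zero_add]
      rw [show hexDigN 0 = '0' from by decide]
      rw [show k + 1 - (hexCharsN (bitsValN rest)).length
          = (k - (hexCharsN (bitsValN rest)).length) + 1 from by omega]
      rw [List.replicate_succ]
      simp
    · rw [hexHX k _ _ (Nat.pos_of_ne_zero hb0) hb4 hm]
      rw [show k + 1 - (hexDigN (bitsValN [a, b, c, d]) ::
          (List.replicate (k - (hexCharsN (bitsValN rest)).length) '0'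
            ++ hexCharsN (bitsValN rest))).length = 0 from by simp; omega]
      simp

theorem hexGoB_eq (n : Nat) : ∀ out, hexGoB (n : Int) out = hexCharsN n ++ out := by
  induction n using Nat.strong_induction_on with
  | _ n ih =>
    intro out
    rw [hexGoB]
    by_cases h0 : n = 0
    · subst h0; rw [if_neg (by norm_num), hexCharsN_zero]; rfl
    · rw [if_pos (by exact_mod_cast Nat.pos_of_ne_zero h0)]
      have hfd : PySem.Int.floordiv (n : Int) 16 = ((n / 16 : Nat) : Int) := by
        rw [show PySem.Int.floordiv (n : Int) 16 = (n : Int).fdiv 16 from rfl,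
          Int.fdiv_eq_ediv]
        omega
      have hfm : PySem.Int.mod (n : Int) 16 = ((n % 16 : Nat) : Int) := by
        rw [show PySem.Int.mod (n : Int) 16 = (n : Int).fmod 16 from rfl,
          Int.fmod_eq_emod]
        omega
      rw [hfd, hfm, PySem.List.pyGetD_natCast]
      rw [ih (n / 16) (Nat.div_lt_self (Nat.pos_of_ne_zero h0) (by norm_num))]
      conv_rhs => rw [hexCharsN, dif_neg h0]
      simp [hexDigN]

theorem zfill_eq (cs : List Char) (w : Int) (h : ∀ c ∈ cs, c ≠ '+' ∧ c ≠ '-') :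
    PySem.Chars.zfill cs w = List.replicate (w.toNat - cs.length) '0' ++ cs := by
  cases cs with
  | nil =>
    simp only [PySem.Chars.zfill]
    split_ifs with hw
    · have h0 : w.toNat = 0 := by simp at hw; omega
      simp [h0]
    · simp
  | cons c rest =>
    obtain ⟨h1, h2⟩ := h c (by simp)
    simp only [PySem.Chars.zfill]
    split_ifs with hw hsign
    · have h0 : w.toNat - (rest.length + 1) = 0 := by simp at hw; omega
      simp [h0]
    · exact absurd hsign (by tauto)
    · rfl

theorem hexDigN_nosign : ∀ i, i < 16 → hexDigN i ≠ '+' ∧ hexDigN i ≠ '-' := by decide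

theorem hexCharsN_nosign (n : Nat) : ∀ c ∈ hexCharsN n, c ≠ '+' ∧ c ≠ '-' := by
  induction n using Nat.strong_induction_on with
  | _ n ih =>
    intro c hc
    by_cases h0 : n = 0
    · subst h0; rw [hexCharsN_zero] at hc; simp at hc
    · rw [hexCharsN, dif_neg h0] at hc
      rcases List.mem_append.mp hc with hc | hc
      · exact ih (n / 16) (Nat.div_lt_self (Nat.pos_of_ne_zero h0) (by norm_num)) c hc
      · simp at hc; subst hc
        exact hexDigN_nosign _ (Nat.mod_lt _ (by norm_num))

theorem bitsToIntB_eq (cs : List Char) : bitsToIntB cs = (bitsValN cs : Int) := by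
  have key : ∀ (t : List Char) (v : Nat),
      t.foldl (fun v c => 2 * v + (if c = '1' then 1 else 0)) ((v : Nat) : Int)
        = ((t.foldl (fun v c => 2 * v + (if c = '1' then 1 else 0)) v : Nat) : Int) := by
    intro t
    induction t with
    | nil => intro v; rfl
    | cons c t ih =>
      intro v
      simp only [List.foldl_cons]
      rw [show (2 * ((v : Nat) : Int) + (if c = '1' then 1 else 0))
          = (((2 * v + (if c = '1' then 1 else 0) : Nat)) : Int) from by push_cast; split_ifs <;> ring]
      exact ih _
  exact key cs 0

theorem fieldA_int (p : List Char) (hbin : ∀ c ∈ p, c = '0' ∨ c = '1') :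
    chunkA (padLeftA p) [] = hexFixed ((p.length + 3) / 4) (bitsValN p) := by
  rw [padLeftA_eq]
  rw [chunk_eq_hexFixed ((p.length + 3) / 4) _ (by simp; omega) (by
    intro c hc
    rcases List.mem_append.mp hc with hc | hc
    · left; exact List.eq_of_mem_replicate hc
    · exact hbin c hc)]
  congr 1
  rw [bitsValN_append, bitsValN_replicate0]
  simp

theorem fieldA_frac (f : List Char) (hbin : ∀ c ∈ f, c = '0' ∨ c = '1') :
    chunkA (padRightA f) []
      = hexFixed ((f.length + 3) / 4) (bitsValN f * 2 ^ ((4 - f.length % 4) % 4)) := by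
  rw [padRightA_eq]
  rw [chunk_eq_hexFixed ((f.length + 3) / 4) _ (by simp; omega) (by
    intro c hc
    rcases List.mem_append.mp hc with hc | hc
    · exact hbin c hc
    · left; exact List.eq_of_mem_replicate hc)]
  congr 1
  rw [bitsValN_append, bitsValN_replicate0]
  simp

theorem fieldB (n L : Nat) (hL : 0 < L) :
    PySem.Chars.zfill (hexDigitsB (n : Int)) (-(PySem.Int.floordiv (-(L : Int)) 4))
      = hexFixed ((L + 3) / 4) n := by
  have hnd : (-(PySem.Int.floordiv (-(L : Int)) 4)) = (((L + 3) / 4 : Nat) : Int) := by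
    rw [show PySem.Int.floordiv (-(L : Int)) 4 = (-(L : Int)).fdiv 4 from rfl,
      Int.fdiv_eq_ediv]
    omega
  have hk1 : 1 ≤ (L + 3) / 4 := by omega
  rw [hnd]
  unfold hexDigitsB
  rw [hexGoB_eq n []]
  simp only [List.append_nil]
  by_cases h0 : n = 0
  · subst h0
    rw [hexCharsN_zero, if_pos rfl, zfill_eq ['0'] _ (by simp)]
    unfold hexFixed
    rw [hexCharsN_zero]
    simp only [List.length_nil, Nat.sub_zero, List.append_nil, List.length_cons,
      Int.toNat_natCast]
    rw [show (L + 3) / 4 = ((L + 3) / 4 - 1) + 1 from by omega, List.replicate_succ']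
    simp
  · rw [if_neg (hexCharsN_ne_nil n h0), zfill_eq _ _ (hexCharsN_nosign n)]
    unfold hexFixed
    rw [Int.toNat_natCast]

theorem padMod_toNat (L : Nat) :
    (PySem.Int.mod (-(L : Int)) 4).toNat = (4 - L % 4) % 4 := by
  rw [show PySem.Int.mod (-(L : Int)) 4 = (-(L : Int)).fmod 4 from rfl, Int.fmod_eq_emod]
  omega

theorem clampIdx_lt (n : Nat) (a : Int) (h1 : a < n) (h2 : 0 < n) :
    PySem.List.clampIdx n a < n := by
  simp only [PySem.List.clampIdx]
  split_ifs <;> omega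

theorem padLeftA_nil : padLeftA [] = [] := by rw [padLeftA]; simp

-- ===== VERDICT (by name: the statement is the Claim_ definition above) =====
theorem bin2hex_spec : Claim_equal_bin2hex := by
  intro bin_str WI _ hpre
  obtain ⟨hne, hintB, hfracB⟩ := hpre
  have hint : WI > 0 →
      ∀ c ∈ PySem.List.slice bin_str.toList none (some (WI + 1)), c = '0' ∨ c = '1' := by
    intro h c hc
    have := hintB h
    simp only [List.all_eq_true, Bool.or_eq_true, beq_iff_eq] at this
    exact this c hc
  have hfrac : (bin_str.toList.length : Int) - WI - 1 > 0 →
      ∀ c ∈ PySem.List.slice bin_str.toList (some (WI + 1)) none, c = '0' ∨ c = '1' := by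
    intro h c hc
    have := hfracB h
    simp only [List.all_eq_true, Bool.or_eq_true, beq_iff_eq] at this
    exact this c hc
  unfold Spec_bin2hex
  simp only [bin2hex, bin2hex_alt]
  set cs := bin_str.toList with hcs
  have hcsne : WI ≤ 0 → cs ≠ [] := by
    intro h hnil
    apply hne h
    cases bin_str
    simp_all
  have hx1 : (if WI > 0 then chunkA (padLeftA (PySem.List.slice cs none (some (WI + 1)))) []
      else match PySem.List.pyGet? cs 0 with | some c => [c] | none => [])
      = (if WI > 0 then
          (if PySem.List.slice cs none (some (WI + 1)) = [] then []
           else PySem.Chars.zfill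
             (hexDigitsB (bitsToIntB (PySem.List.slice cs none (some (WI + 1)))))
             (-(PySem.Int.floordiv (-((PySem.List.slice cs none (some (WI + 1))).length : Int)) 4)))
        else match PySem.List.pyGet? cs 0 with | some c => [c] | none => []) := by
    by_cases hWI : WI > 0
    · simp only [if_pos hWI]
      by_cases hpe : PySem.List.slice cs none (some (WI + 1)) = []
      · rw [if_pos hpe, hpe, padLeftA_nil, chunkA_nil]
      · rw [if_neg hpe]
        have hL : 0 < (PySem.List.slice cs none (some (WI + 1))).length :=
          List.length_pos_iff.mpr hpe
        rw [fieldA_int _ (hint hWI), bitsToIntB_eq, fieldB _ _ hL]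
    · simp only [if_neg hWI]
  rw [hx1]
  have hx2 : (cs.length : Int) - WI - 1 > 0 →
      chunkA (padRightA (PySem.List.slice cs (some (WI + 1)) none)) []
      = PySem.Chars.zfill
          (hexDigitsB (bitsToIntB (PySem.List.slice cs (some (WI + 1)) none)
            * 2 ^ (PySem.Int.mod (-(((PySem.List.slice cs (some (WI + 1)) none).length : Int))) 4).toNat))
          (-(PySem.Int.floordiv (-(((PySem.List.slice cs (some (WI + 1)) none).length : Int))) 4)) := by
    intro hWF
    · have hcl : 0 < cs.length := by
        by_cases hWI : WI > 0
        · omega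
        · exact List.length_pos_iff.mpr (hcsne (by omega))
      have hflen : 0 < (PySem.List.slice cs (some (WI + 1)) none).length := by
        rw [PySem.List.slice_some_none, List.length_drop]
        have := clampIdx_lt cs.length (WI + 1) (by omega) hcl
        omega
      rw [fieldA_frac _ (hfrac hWF)]
      rw [show bitsToIntB (PySem.List.slice cs (some (WI + 1)) none)
            * 2 ^ (PySem.Int.mod (-(((PySem.List.slice cs (some (WI + 1)) none).length : Int))) 4).toNat
          = ((bitsValN (PySem.List.slice cs (some (WI + 1)) none)
            * 2 ^ ((4 - (PySem.List.slice cs (some (WI + 1)) none).length % 4) % 4) : Nat) : Int)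
        from by rw [bitsToIntB_eq, padMod_toNat]; push_cast; ring]
      rw [fieldB _ _ hflen]
  by_cases hWF : (cs.length : Int) - WI - 1 > 0
  · rw [if_pos hWF, if_pos hWF, hx2 hWF]
    simp [List.length_eq_zero_iff]
  · rw [if_neg hWF, if_neg hWF]
    simp [List.length_eq_zero_iff]
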